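-- pv_equiv track=rewrite | github.com/Moonipur/CMUTEAM-CRU | TSV2BED.py | DELETE_NOR
-- ===== SOURCE A (Python) =====
-- def DELETE_NOR(n_Chr, start, end, n_Type):
--     index_list = []
--     for index, i in enumerate(n_Type, 0):
--         if i == 'NOR':
--             index_list.append(index)
--         else:
--             pass
--
--     for j in sorted(index_list, reverse = True):
--         del n_Chr[j]
--         del start[j]
--         del end[j]
--         del n_Type[j]
--
--     return n_Chr, start, end, n_Type
-- ===== SOURCE B (Python) =====
-- # Equivalence is about the RETURN value only: A mutates its list arguments in
-- # place, B builds fresh filtered lists without touching the originals.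
-- def DELETE_NOR(n_Chr, start, end, n_Type):
--     nor = {i for i, t in enumerate(n_Type) if t == 'NOR'}
--     def keep(L):
--         return [v for i, v in enumerate(L) if i not in nor]
--     return keep(n_Chr), keep(start), keep(end), keep(n_Type)
-- ===== Notes on version B (the rewrite author's own statement) =====
-- stated objective: idiomatic
-- what changed: Replaces collect-NOR-indices-then-delete-them-descending-in-place with a NOR-position set built once and a single filtering comprehension per list (return value only: A mutates its arguments, B does not).
import Mathlib
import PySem

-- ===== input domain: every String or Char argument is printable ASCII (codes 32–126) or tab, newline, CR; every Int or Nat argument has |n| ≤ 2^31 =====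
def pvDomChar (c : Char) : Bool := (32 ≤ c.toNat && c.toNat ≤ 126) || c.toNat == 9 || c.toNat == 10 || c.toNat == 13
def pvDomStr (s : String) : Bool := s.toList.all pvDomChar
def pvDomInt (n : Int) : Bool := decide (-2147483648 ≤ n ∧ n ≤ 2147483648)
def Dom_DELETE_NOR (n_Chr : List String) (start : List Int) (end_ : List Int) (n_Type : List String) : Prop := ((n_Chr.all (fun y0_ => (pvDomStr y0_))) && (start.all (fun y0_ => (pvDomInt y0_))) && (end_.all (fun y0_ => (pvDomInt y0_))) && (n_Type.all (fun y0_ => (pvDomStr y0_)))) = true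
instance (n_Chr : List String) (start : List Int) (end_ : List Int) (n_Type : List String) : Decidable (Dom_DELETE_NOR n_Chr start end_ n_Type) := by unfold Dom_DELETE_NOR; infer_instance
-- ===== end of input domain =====

-- B builds the set of 'NOR' positions once and rebuilds each list by one filtering
-- pass over it, instead of A's collect-NOR-indices then delete-descending-in-place;
-- equivalence is about the RETURN value only (A mutates its arguments, B does not).

-- ===== PORT A =====
-- del L[j]: PySem.List.pop? returns none on IndexError (excluded by Pre_); the list is then kept unchanged
def pvDel {α : Type} (L : List α) (j : Int) : List α :=
  ((PySem.List.pop? L j).map Prod.snd).getD L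

def DELETE_NOR (n_Chr : List String) (start : List Int) (end_ : List Int) (n_Type : List String) : List String × List Int × List Int × List String :=
  -- index_list = []; for index, i in enumerate(n_Type, 0): if i == 'NOR': index_list.append(index)
  let index_list : List Int :=
    (PySem.List.enumerate n_Type 0).foldl
      (fun acc p => if p.2 == "NOR" then acc ++ [p.1] else acc) []
  -- for j in sorted(index_list, reverse=True): del n_Chr[j]; del start[j]; del end[j]; del n_Type[j]
  (PySem.List.sorted index_list (fun x => x) true).foldl
    (fun (st : List String × List Int × List Int × List String) j =>
      (pvDel st.1 j, pvDel st.2.1 j, pvDel st.2.2.1 j, pvDel st.2.2.2 j))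
    (n_Chr, start, end_, n_Type)

-- ===== PORT B =====
-- keep(L) = [v for i, v in enumerate(L) if i not in nor]
def pvKeepPort {α : Type} (nor : List Int) (L : List α) : List α :=
  ((PySem.List.enumerate L 0).filter (fun p => !(nor.contains p.1))).map (·.2)

def DELETE_NOR_alt (n_Chr : List String) (start : List Int) (end_ : List Int) (n_Type : List String) : List String × List Int × List Int × List String :=
  -- nor = {i for i, t in enumerate(n_Type) if t == 'NOR'}
  let nor : List Int := PySem.Set.ofList
    (((PySem.List.enumerate n_Type 0).filter (fun p => p.2 == "NOR")).map (·.1))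
  (pvKeepPort nor n_Chr, pvKeepPort nor start, pvKeepPort nor end_, pvKeepPort nor n_Type)

-- ===== PRECONDITION & SPEC =====
-- Pre_ is exactly A's domain: A raises IndexError iff some 'NOR' position of n_Type
-- is out of range for one of the other three lists (del of that index fails).
def Pre_DELETE_NOR (n_Chr : List String) (start : List Int) (end_ : List Int) (n_Type : List String) : Prop :=
  ∀ i : Nat, i < n_Type.length → n_Type.getD i "" = "NOR" →
    i < n_Chr.length ∧ i < start.length ∧ i < end_.length
instance (n_Chr : List String) (start : List Int) (end_ : List Int) (n_Type : List String) : Decidable (Pre_DELETE_NOR n_Chr start end_ n_Type) := by unfold Pre_DELETE_NOR; infer_instance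

def pvWitness_DELETE_NOR : List String × List Int × List Int × List String :=
  (["chr1", "chr2", "chr3"], [10, 20, 30], [15, 25, 35], ["NOR", "DUP", "NOR"])

def Spec_DELETE_NOR (n_Chr : List String) (start : List Int) (end_ : List Int) (n_Type : List String) (out : List String × List Int × List Int × List String) : Prop := out = DELETE_NOR_alt n_Chr start end_ n_Type
instance (n_Chr : List String) (start : List Int) (end_ : List Int) (n_Type : List String) (out : List String × List Int × List Int × List String) : Decidable (Spec_DELETE_NOR n_Chr start end_ n_Type out) := by unfold Spec_DELETE_NOR; infer_instance

-- ===== CLAIM (what is proved, stated in full; the proofs are below) =====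
def Claim_equal_DELETE_NOR : Prop := ∀ (n_Chr : List String) (start : List Int) (end_ : List Int) (n_Type : List String), Dom_DELETE_NOR n_Chr start end_ n_Type → Pre_DELETE_NOR n_Chr start end_ n_Type → Spec_DELETE_NOR n_Chr start end_ n_Type (DELETE_NOR n_Chr start end_ n_Type)

-- ===== LEMMAS AND PROOFS =====

/-- Ascending positions (as Nats, from offset `s`) of `"NOR"` entries of `t`. -/
def pvIstr : List String → Nat → List Nat
  | [], _ => []
  | x :: ts, s => (if x == "NOR" then [s] else []) ++ pvIstr ts (s + 1)

/-- Keep the elements of `L` at positions where `t` is not `"NOR"` (a tail of `L`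
beyond `t`'s length is kept whole, as A never deletes there). -/
def pvKeep {α : Type} : List String → List α → List α
  | x :: ts, y :: L => if x == "NOR" then pvKeep ts L else y :: pvKeep ts L
  | [], L => L
  | _ :: _, [] => []

/-- Delete the ascending index list `js` from `L`, largest index first. -/
def pvDelAll {α : Type} (js : List Nat) (L : List α) : List α :=
  js.foldr (fun n M => pvDel M (↑n : Int)) L

lemma pvIstr_shift (t : List String) : ∀ s : Nat, pvIstr t (s + 1) = (pvIstr t s).map (· + 1) := by
  induction t with
  | nil => intro s; simp [pvIstr]
  | cons x ts ih =>
    intro s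
    by_cases hx : x == "NOR" <;> simp [pvIstr, hx, ih (s + 1)]

lemma pvIstr_ge (t : List String) : ∀ s : Nat, ∀ j ∈ pvIstr t s, s ≤ j := by
  induction t with
  | nil => intro s; simp [pvIstr]
  | cons x ts ih =>
    intro s j hj
    simp only [pvIstr, List.mem_append] at hj
    rcases hj with hj | hj
    · by_cases hx : x == "NOR"
      · simp [hx] at hj; omega
      · simp [hx] at hj
    · have := ih (s + 1) j hj; omega

lemma pvIstr_pairwise (t : List String) : ∀ s : Nat, (pvIstr t s).Pairwise (· < ·) := by
  induction t with
  | nil => intro s; simp [pvIstr]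
  | cons x ts ih =>
    intro s
    by_cases hx : x == "NOR"
    · simp only [pvIstr, hx, if_pos, List.singleton_append, List.pairwise_cons]
      exact ⟨fun j hj => by have := pvIstr_ge ts (s + 1) j hj; omega, ih (s + 1)⟩
    · simp only [pvIstr, hx, Bool.false_eq_true]
      exact ih (s + 1)

lemma pvEnum_filter (t : List String) : ∀ m : Nat,
    ((PySem.List.enumerate t (m : Int)).filter (fun p => p.2 == "NOR")).map (·.1)
      = (pvIstr t m).map (↑· : Nat → Int) := by
  induction t with
  | nil => intro m; simp [PySem.List.enumerate_nil, pvIstr]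
  | cons x ts ih =>
    intro m
    rw [PySem.List.enumerate_cons,
      show ((m : Int) + 1) = ((m + 1 : Nat) : Int) by push_cast; ring]
    by_cases hx : x == "NOR" <;>
      simp [hx, pvIstr] <;>
      exact_mod_cast ih (m + 1)

lemma pvPop_none {α : Type} (L : List α) (n : Nat) (h : ¬ n < L.length) :
    PySem.List.pop? L (n : Int) = none := by
  simp [PySem.List.pop?, PySem.List.pyIdx?]
  omega

lemma pvDel_cons_succ {α : Type} (y : α) (L : List α) (n : Nat) :
    pvDel (y :: L) ((n : Int) + 1) = y :: pvDel L (n : Int) := by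
  have e1 : ((n : Int) + 1) = ((n + 1 : Nat) : Int) := by push_cast; ring
  rw [e1]
  by_cases h : n < L.length
  · have h1 : n + 1 < (y :: L).length := by simp; omega
    unfold pvDel
    rw [PySem.List.pop?_natCast _ _ h1, PySem.List.pop?_natCast _ _ h]
    simp
  · have h1 : ¬ n + 1 < (y :: L).length := by simp; omega
    unfold pvDel
    rw [pvPop_none _ _ h, pvPop_none _ _ h1]
    simp

lemma pvDelAll_shift {α : Type} (js : List Nat) (y : α) (L : List α) :
    pvDelAll (js.map (· + 1)) (y :: L) = y :: pvDelAll js L := by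
  induction js with
  | nil => simp [pvDelAll]
  | cons n js ih =>
    have e1 : ((n + 1 : Nat) : Int) = (n : Int) + 1 := by push_cast; ring
    calc pvDelAll ((n :: js).map (· + 1)) (y :: L)
        = pvDel (pvDelAll (js.map (· + 1)) (y :: L)) ((n + 1 : Nat) : Int) := rfl
      _ = pvDel (y :: pvDelAll js L) ((n : Int) + 1) := by rw [ih, e1]
      _ = y :: pvDel (pvDelAll js L) (n : Int) := pvDel_cons_succ _ _ _
      _ = y :: pvDelAll (n :: js) L := rfl

lemma pvDel_zero_cons {α : Type} (y : α) (L : List α) :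
    pvDel (y :: L) (((0 : Nat) : Int)) = L := by
  unfold pvDel
  rw [Int.natCast_zero, PySem.List.pop?_zero_cons]
  rfl

lemma pvIstr_mem (t : List String) : ∀ s : Nat, ∀ j ∈ pvIstr t s,
    ∃ k : Nat, k < t.length ∧ j = s + k ∧ t.getD k "" = "NOR" := by
  induction t with
  | nil => intro s; simp [pvIstr]
  | cons x ts ih =>
    intro s j hj
    simp only [pvIstr, List.mem_append] at hj
    rcases hj with hj | hj
    · by_cases hx : x == "NOR"
      · simp [hx] at hj
        exact ⟨0, by simp, by omega, by simpa using hx⟩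
      · simp [hx] at hj
    · obtain ⟨k, hk, hjk, hnor⟩ := ih (s + 1) j hj
      exact ⟨k + 1, by simpa using hk, by omega, by simpa using hnor⟩

lemma pvDelAll_keep {α : Type} (t : List String) : ∀ L : List α,
    (∀ j ∈ pvIstr t 0, j < L.length) →
    pvDelAll (pvIstr t 0) L = pvKeep t L := by
  induction t with
  | nil => intro L _; simp [pvDelAll, pvIstr, pvKeep]
  | cons x ts ih =>
    intro L hL
    have h0 : pvIstr (x :: ts) 0
        = (if x == "NOR" then [0] else []) ++ (pvIstr ts 0).map (· + 1) := by
      show (if x == "NOR" then [(0 : Nat)] else []) ++ pvIstr ts (0 + 1) = _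
      rw [pvIstr_shift ts 0]
    cases L with
    | nil =>
      have hempty : pvIstr (x :: ts) 0 = [] := by
        apply List.eq_nil_iff_forall_not_mem.mpr
        intro j hj
        have := hL j hj
        simp at this
      rw [hempty]
      cases ts <;> simp [pvDelAll, pvKeep]
    | cons y L' =>
      have hL' : ∀ j ∈ pvIstr ts 0, j < L'.length := by
        intro j hj
        have hmem : j + 1 ∈ pvIstr (x :: ts) 0 := by
          rw [h0]; exact List.mem_append_right _ (List.mem_map_of_mem hj)
        have := hL (j + 1) hmem
        simpa using this
      by_cases hx : x == "NOR"
      · rw [h0, if_pos hx, List.singleton_append]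
        calc pvDelAll ((0 : Nat) :: (pvIstr ts 0).map (· + 1)) (y :: L')
            = pvDel (pvDelAll ((pvIstr ts 0).map (· + 1)) (y :: L')) (((0 : Nat) : Int)) := rfl
          _ = pvDel (y :: pvDelAll (pvIstr ts 0) L') (((0 : Nat) : Int)) := by
                rw [pvDelAll_shift]
          _ = pvDelAll (pvIstr ts 0) L' := pvDel_zero_cons _ _
          _ = pvKeep ts L' := ih L' hL'
          _ = pvKeep (x :: ts) (y :: L') := by simp [pvKeep, hx]
      · rw [h0, if_neg hx, List.nil_append, pvDelAll_shift, ih L' hL']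
        simp [pvKeep, hx]

lemma pvFold_prod (js : List Int) : ∀ (c : List String) (s e : List Int) (t : List String),
    js.foldl (fun (st : List String × List Int × List Int × List String) j =>
        (pvDel st.1 j, pvDel st.2.1 j, pvDel st.2.2.1 j, pvDel st.2.2.2 j)) (c, s, e, t)
      = (js.foldl pvDel c, js.foldl pvDel s, js.foldl pvDel e, js.foldl pvDel t) := by
  induction js with
  | nil => intro c s e t; simp
  | cons j js ih => intro c s e t; simp only [List.foldl_cons]; exact ih _ _ _ _

lemma pvSorted_rev (t : List String) :
    PySem.List.sorted ((pvIstr t 0).map (↑· : Nat → Int)) (fun x => x) true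
      = ((pvIstr t 0).map (↑· : Nat → Int)).reverse := by
  apply PySem.List.sorted_rev_eq_of_perm_of_pairwise_gt
  · exact List.reverse_perm _
  · rw [List.pairwise_reverse]
    have h : ((pvIstr t 0).map (↑· : Nat → Int)).Pairwise (· < ·) :=
      List.Pairwise.map _ (fun a b hab => by exact_mod_cast hab) (pvIstr_pairwise t 0)
    exact h.imp (fun hab => hab)

lemma pvFoldlRev_eq_delAll {α : Type} (js : List Nat) (L : List α) :
    ((js.map (↑· : Nat → Int)).reverse).foldl pvDel L = pvDelAll js L := by
  rw [List.foldl_reverse]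
  induction js with
  | nil => rfl
  | cons n js ih =>
    calc ((n :: js).map (↑· : Nat → Int)).foldr (fun x acc => pvDel acc x) L
        = pvDel ((js.map (↑· : Nat → Int)).foldr (fun x acc => pvDel acc x) L) (n : Int) := rfl
      _ = pvDel (pvDelAll js L) (n : Int) := by rw [ih]
      _ = pvDelAll (n :: js) L := rfl

lemma pvKeepPort_eq {α : Type} (t : List String) : ∀ (L : List α) (m : Nat),
    ((PySem.List.enumerate L (m : Int)).filter
        (fun p => !(((pvIstr t m).map (↑· : Nat → Int)).contains p.1))).map (·.2)
      = pvKeep t L := by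
  induction t with
  | nil =>
    intro L m
    simp [pvIstr, pvKeep, PySem.List.map_snd_enumerate]
  | cons x ts ih =>
    intro L m
    cases L with
    | nil => simp [PySem.List.enumerate_nil, pvKeep]
    | cons y L' =>
      rw [PySem.List.enumerate_cons, List.filter_cons]
      have hmem : ∀ j : Int, j ∈ (pvIstr (x :: ts) m).map (↑· : Nat → Int) ↔
          ((x == "NOR") = true ∧ j = (m : Int)) ∨ j ∈ (pvIstr ts (m + 1)).map (↑· : Nat → Int) := by
        intro j
        show j ∈ ((if x == "NOR" then [m] else []) ++ pvIstr ts (m + 1)).map (↑· : Nat → Int) ↔ _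
        by_cases hx : x == "NOR" <;> simp [hx]
      have hhead : (((pvIstr (x :: ts) m).map (↑· : Nat → Int)).contains ((m : Int), y).1)
          = (x == "NOR") := by
        rw [Bool.eq_iff_iff, List.contains_iff_mem, hmem]
        constructor
        · rintro (⟨h1, _⟩ | h2)
          · exact h1
          · obtain ⟨k, hk, hke⟩ := List.mem_map.mp h2
            have := pvIstr_ge ts (m + 1) k hk
            omega
        · intro h1
          exact Or.inl ⟨h1, rfl⟩
      have htail : (PySem.List.enumerate L' ((m : Int) + 1)).filter
            (fun p => !(((pvIstr (x :: ts) m).map (↑· : Nat → Int)).contains p.1))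
          = (PySem.List.enumerate L' ((m : Int) + 1)).filter
            (fun p => !(((pvIstr ts (m + 1)).map (↑· : Nat → Int)).contains p.1)) := by
        apply List.filter_congr
        intro p hp
        rw [PySem.List.mem_enumerate_iff] at hp
        obtain ⟨k, hkl, rfl⟩ := hp
        have hcont : (((pvIstr (x :: ts) m).map (↑· : Nat → Int)).contains ((m : Int) + 1 + (k : Int)))
            = (((pvIstr ts (m + 1)).map (↑· : Nat → Int)).contains ((m : Int) + 1 + (k : Int))) := by
          rw [Bool.eq_iff_iff, List.contains_iff_mem, List.contains_iff_mem, hmem]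
          constructor
          · rintro (⟨_, h1⟩ | h2)
            · omega
            · exact h2
          · exact Or.inr
        simp only [hcont]
      have hcast : ((m : Int) + 1) = ((m + 1 : Nat) : Int) := by push_cast; ring
      by_cases hx : x == "NOR"
      · rw [hhead, hx]
        simp only [Bool.not_true, Bool.false_eq_true, if_false]
        rw [htail, hcast, ih L' (m + 1)]
        simp [pvKeep, hx]
      · have hx' : (x == "NOR") = false := by simpa using hx
        rw [hhead, hx']
        simp only [Bool.not_false, if_true, List.map_cons]
        rw [htail, hcast, ih L' (m + 1)]
        simp [pvKeep, hx]

lemma pvIstr_nodup_cast (t : List String) :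
    ((pvIstr t 0).map (↑· : Nat → Int)).Nodup := by
  have h : ((pvIstr t 0).map (↑· : Nat → Int)).Pairwise (· < ·) :=
    List.Pairwise.map _ (fun a b hab => by exact_mod_cast hab) (pvIstr_pairwise t 0)
  exact h.imp (fun hab => ne_of_lt hab)

-- ===== VERDICT (by name: the statement is the Claim_ definition above) =====
theorem DELETE_NOR_spec : Claim_equal_DELETE_NOR := by
  intro c s e t _hdom hpre
  unfold Spec_DELETE_NOR
  simp only [DELETE_NOR, DELETE_NOR_alt]
  have hidx : (PySem.List.enumerate t 0).foldl
      (fun acc p => if p.2 == "NOR" then acc ++ [p.1] else acc) ([] : List Int)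
      = (pvIstr t 0).map (↑· : Nat → Int) := by
    rw [PySem.List.foldl_append_if]
    have h := pvEnum_filter t 0
    rw [Int.natCast_zero] at h
    simpa using h
  have hfilter : ((PySem.List.enumerate t 0).filter (fun p => p.2 == "NOR")).map (·.1)
      = (pvIstr t 0).map (↑· : Nat → Int) := by
    have h := pvEnum_filter t 0
    rw [Int.natCast_zero] at h
    exact h
  have hnor : PySem.Set.ofList
      (((PySem.List.enumerate t 0).filter (fun p => p.2 == "NOR")).map (·.1))
      = (pvIstr t 0).map (↑· : Nat → Int) := by
    rw [hfilter]
    exact PySem.Set.ofList_eq_self_of_nodup _ (pvIstr_nodup_cast t)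
  have hbound : ∀ (n : Nat), (∀ i : Nat, i < t.length → t.getD i "" = "NOR" → i < n) →
      ∀ j ∈ pvIstr t 0, j < n := by
    intro n hn j hj
    obtain ⟨k, hk, hjk, hnork⟩ := pvIstr_mem t 0 j hj
    have := hn k hk hnork
    omega
  have hc := hbound c.length (fun i hi hn => (hpre i hi hn).1)
  have hs := hbound s.length (fun i hi hn => (hpre i hi hn).2.1)
  have he := hbound e.length (fun i hi hn => (hpre i hi hn).2.2)
  have ht : ∀ j ∈ pvIstr t 0, j < t.length := by
    intro j hj
    obtain ⟨k, hk, hjk, _⟩ := pvIstr_mem t 0 j hj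
    omega
  rw [hidx, hnor, pvSorted_rev, pvFold_prod]
  rw [pvFoldlRev_eq_delAll, pvFoldlRev_eq_delAll, pvFoldlRev_eq_delAll, pvFoldlRev_eq_delAll]
  rw [pvDelAll_keep t c hc, pvDelAll_keep t s hs, pvDelAll_keep t e he, pvDelAll_keep t t ht]
  have hk := fun (α : Type) (L : List α) => pvKeepPort_eq t L 0
  simp only [Int.natCast_zero] at hk
  simp only [pvKeepPort]
  rw [hk _ c, hk _ s, hk _ e, hk _ t]
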